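-- pv_equiv track=rewrite | github.com/davidsmoreno/NLP-News-Project | Data_Exploring.py | filter_phrases_by_neighbors
-- ===== SOURCE A (Python) =====
-- def filter_phrases_by_neighbors(phrases, list_ny_neighbors):
--     filtered_phrases = []
--     corresponding_neighbors = []
--
--     for phrase in phrases:
--         for neighborhood in list_ny_neighbors:
--             if neighborhood.upper() in phrase.upper():
--                 filtered_phrases.append(phrase)
--                 corresponding_neighbors.append(neighborhood)
--                 break  # Break the loop after finding the first matching neighborhood
--
--     return filtered_phrases, corresponding_neighbors
-- ===== SOURCE B (Python) =====
-- def filter_phrases_by_neighbors(phrases, list_ny_neighbors):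
--     # Transposed scan: one pass per neighborhood over the still-unmatched phrases,
--     # uppercasing every phrase exactly once; earlier neighborhoods claim phrases first.
--     ups = [phrase.upper() for phrase in phrases]
--     hit = [None] * len(phrases)
--     remaining = list(range(len(phrases)))
--     for neighborhood in list_ny_neighbors:
--         pat = neighborhood.upper()
--         still = []
--         for p in remaining:
--             if pat in ups[p]:
--                 hit[p] = neighborhood
--             else:
--                 still.append(p)
--         remaining = still
--     filtered_phrases = []
--     corresponding_neighbors = []
--     for p in range(len(phrases)):
--         if hit[p] is not None:
--             filtered_phrases.append(phrases[p])
--             corresponding_neighbors.append(hit[p])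
--     return filtered_phrases, corresponding_neighbors
-- ===== Notes on version B (the rewrite author's own statement) =====
-- stated objective: alternative
-- what changed: A scans neighborhoods inside a per-phrase loop, re-uppercasing the phrase for every neighborhood and breaking at the first hit; B transposes the loops: it uppercases every phrase exactly once, makes one pass per neighborhood over a shrinking worklist of still-unmatched phrase indices (earlier neighborhoods claim phrases first), and rebuilds both output lists in phrase order.
import Mathlib
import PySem

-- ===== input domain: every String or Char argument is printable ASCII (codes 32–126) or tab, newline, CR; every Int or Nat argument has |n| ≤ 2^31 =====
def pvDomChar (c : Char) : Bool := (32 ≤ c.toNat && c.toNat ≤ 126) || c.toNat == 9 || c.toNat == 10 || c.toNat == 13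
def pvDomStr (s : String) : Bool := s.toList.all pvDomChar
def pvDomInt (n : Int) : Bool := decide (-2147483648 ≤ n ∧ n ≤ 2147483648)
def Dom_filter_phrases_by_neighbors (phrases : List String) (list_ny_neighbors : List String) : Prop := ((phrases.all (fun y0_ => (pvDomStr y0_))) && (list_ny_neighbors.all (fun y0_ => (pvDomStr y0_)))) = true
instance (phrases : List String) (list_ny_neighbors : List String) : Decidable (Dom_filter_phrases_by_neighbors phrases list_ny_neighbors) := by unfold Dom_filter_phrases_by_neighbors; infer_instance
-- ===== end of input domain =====

-- B transposes A's loops: instead of scanning the neighborhood list inside a per-phrase loop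
-- (re-uppercasing the phrase each time), it uppercases every phrase once and makes one pass per
-- neighborhood over a shrinking worklist of still-unmatched phrase indices (alternative decomposition).

-- ===== PORT A =====
-- inner 'for neighborhood in list_ny_neighbors: … break' loop of A
def pvAFind (phrase : String) : List String → Option String
  | [] => none
  | nb :: rest =>
    if PySem.Str.isIn (PySem.Str.upper nb) (PySem.Str.upper phrase) then some nb
    else pvAFind phrase rest

def filter_phrases_by_neighbors (phrases : List String) (list_ny_neighbors : List String) : List String × List String :=
  phrases.foldl (fun acc phrase =>
    match pvAFind phrase list_ny_neighbors with
    | some nb => (acc.1 ++ [phrase], acc.2 ++ [nb])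
    | none => acc) ([], [])

-- ===== PORT B =====
def filter_phrases_by_neighbors_alt (phrases : List String) (list_ny_neighbors : List String) : List String × List String :=
  let ups := phrases.map PySem.Str.upper
  -- 'hit = [None]*len(phrases); remaining = list(range(len(phrases)))', then the two worklist loops
  let st := list_ny_neighbors.foldl
    (fun (st : List (Option String) × List Int) nb =>
      let pat := PySem.Str.upper nb
      st.2.foldl
        (fun (st2 : List (Option String) × List Int) p =>
          if PySem.Str.isIn pat (PySem.List.pyGetD ups p "") then
            (PySem.List.pySetD st2.1 p (some nb), st2.2)
          else (st2.1, st2.2 ++ [p]))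
        (st.1, ([] : List Int)))
    (List.replicate phrases.length none, PySem.List.pyRange 0 (phrases.length : Int) 1)
  -- final 'for p in range(len(phrases))' reconstruction pass
  (PySem.List.pyRange 0 (phrases.length : Int) 1).foldl
    (fun acc p =>
      match PySem.List.pyGetD st.1 p none with
      | some nb => (acc.1 ++ [PySem.List.pyGetD phrases p ""], acc.2 ++ [nb])
      | none => acc)
    (([] : List String), ([] : List String))

-- ===== PRECONDITION & SPEC =====
def Spec_filter_phrases_by_neighbors (phrases : List String) (list_ny_neighbors : List String) (out : List String × List String) : Prop := out = filter_phrases_by_neighbors_alt phrases list_ny_neighbors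
instance (phrases : List String) (list_ny_neighbors : List String) (out : List String × List String) : Decidable (Spec_filter_phrases_by_neighbors phrases list_ny_neighbors out) := by unfold Spec_filter_phrases_by_neighbors; infer_instance

-- ===== CLAIM (what is proved, stated in full; the proofs are below) =====
def Claim_equal_filter_phrases_by_neighbors : Prop := ∀ (phrases : List String) (list_ny_neighbors : List String), Dom_filter_phrases_by_neighbors phrases list_ny_neighbors → Spec_filter_phrases_by_neighbors phrases list_ny_neighbors (filter_phrases_by_neighbors phrases list_ny_neighbors)

-- ===== LEMMAS AND PROOFS =====

-- intended value of B's 'hit' list after processing the neighborhoods 'done'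
def pvHits (phrases : List String) (done : List String) : List (Option String) :=
  phrases.map (fun ph => pvAFind ph done)

-- intended value of B's 'remaining' worklist after processing 'done'
def pvRem (phrases : List String) (done : List String) : List Int :=
  (PySem.List.pyRange 0 (phrases.length : Int) 1).filter
    (fun p => decide (pvAFind (PySem.List.pyGetD phrases p "") done = none))

-- A's scan run on 'done ++ [nb]': either the old result, or a fresh match of nb
theorem pvAFind_append (ph nb : String) (done : List String) :
    pvAFind ph (done ++ [nb])
      = (match pvAFind ph done with
         | some x => some x
         | none => if PySem.Str.isIn (PySem.Str.upper nb) (PySem.Str.upper ph) then some nb else none) := by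
  induction done with
  | nil => simp [pvAFind]
  | cons d rest ih =>
    simp only [List.cons_append, pvAFind]
    by_cases h : PySem.Chars.isIn (PySem.Chars.upper d.toList) (PySem.Chars.upper ph.toList) = true <;>
      simp [h, ih]

-- a lookup in the uppercased-phrases table is the uppercase of the lookup
theorem pvGetUps (phrases : List String) (p : Int) :
    PySem.List.pyGetD (phrases.map PySem.Str.upper) p ""
      = PySem.Str.upper (PySem.List.pyGetD phrases p "") := by
  have h : (PySem.Str.upper "") = "" := by decide
  rw [← PySem.List.pyGetD_map PySem.Str.upper phrases p "", h]

-- one pass of B's inner worklist loop over R: worklist shrinks by the matches,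
-- the hit table gains the update value exactly at the matching indices of R
theorem pvInner (m : Int → Bool) (v : Option String) :
    ∀ (R : List Int) (hit : List (Option String)) (still : List Int),
      (∀ p ∈ R, 0 ≤ p ∧ p < (hit.length : Int)) →
      (R.foldl (fun (st2 : List (Option String) × List Int) p =>
          if m p then (PySem.List.pySetD st2.1 p v, st2.2) else (st2.1, st2.2 ++ [p])) (hit, still)).2
        = still ++ R.filter (fun p => !m p) ∧
      ∀ (q : Nat),
        (R.foldl (fun (st2 : List (Option String) × List Int) p =>
          if m p then (PySem.List.pySetD st2.1 p v, st2.2) else (st2.1, st2.2 ++ [p])) (hit, still)).1[q]?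
          = if (q : Int) ∈ R ∧ m q then some v else hit[q]? := by
  intro R
  induction R with
  | nil =>
    intro hit still _
    refine ⟨by simp, ?_⟩
    intro q
    simp
  | cons p R' ih =>
    intro hit still hb
    have hp := hb p (by simp)
    by_cases hm : m p = true
    · simp only [List.foldl_cons, hm, if_pos]
      have hb' : ∀ x ∈ R', 0 ≤ x ∧ x < ((PySem.List.pySetD hit p v).length : Int) := by
        intro x hx
        simpa [PySem.List.length_pySetD] using hb x (by simp [hx])
      obtain ⟨ih2, ih3⟩ := ih (PySem.List.pySetD hit p v) still hb'
      refine ⟨by rw [ih2]; simp [hm], ?_⟩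
      intro q
      rw [ih3 q, PySem.List.pySetD_of_nonneg hit v hp.1]
      by_cases h1 : (q : Int) ∈ R' ∧ m q = true
      · rw [if_pos h1, if_pos ⟨by simp [h1.1], h1.2⟩]
      · rw [if_neg h1, List.getElem?_set]
        by_cases hqp : (q : Int) = p
        · have hq : p.toNat = q := by omega
          rw [if_pos hq, if_pos (by omega), if_pos ⟨by simp [hqp.symm], by rwa [hqp]⟩]
        · rw [if_neg (by omega), if_neg]
          rintro ⟨hmem, hmq⟩
          rcases List.mem_cons.mp hmem with h | h
          · exact hqp h
          · exact h1 ⟨h, hmq⟩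
    · simp only [List.foldl_cons, hm, if_neg, Bool.false_eq_true, not_false_iff]
      obtain ⟨ih2, ih3⟩ := ih hit (still ++ [p]) (fun x hx => hb x (by simp [hx]))
      refine ⟨by rw [ih2]; simp [hm], ?_⟩
      intro q
      rw [ih3 q]
      by_cases hqp : (q : Int) = p
      · rw [if_neg, if_neg]
        · rintro ⟨_, hmq⟩; rw [hqp] at hmq; simp [hmq] at hm
        · rintro ⟨_, hmq⟩; rw [hqp] at hmq; simp [hmq] at hm
      · congr 1
        simp only [List.mem_cons, eq_iff_iff]
        constructor
        · rintro ⟨h, h2⟩; exact ⟨Or.inr h, h2⟩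
        · rintro ⟨h | h, h2⟩
          · exact absurd h hqp
          · exact ⟨h, h2⟩

-- membership in the worklist
theorem pvMem_rem (phrases done : List String) (q : Nat) :
    ((q : Int) ∈ pvRem phrases done)
      ↔ (q < phrases.length ∧ pvAFind (PySem.List.pyGetD phrases (q : Int) "") done = none) := by
  unfold pvRem
  rw [List.mem_filter, PySem.List.mem_pyRange_one]
  constructor
  · rintro ⟨⟨_, h2⟩, h3⟩
    exact ⟨by exact_mod_cast h2, by simpa using h3⟩
  · rintro ⟨h1, h2⟩
    exact ⟨⟨by positivity, by exact_mod_cast h1⟩, by simpa using h2⟩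

-- B's outer loop maintains (pvHits, pvRem)
theorem pvOuter (phrases : List String) :
    ∀ (todo done : List String),
      todo.foldl
        (fun (st : List (Option String) × List Int) nb =>
          let pat := PySem.Str.upper nb
          st.2.foldl
            (fun (st2 : List (Option String) × List Int) p =>
              if PySem.Str.isIn pat (PySem.List.pyGetD (phrases.map PySem.Str.upper) p "") then
                (PySem.List.pySetD st2.1 p (some nb), st2.2)
              else (st2.1, st2.2 ++ [p]))
            (st.1, ([] : List Int)))
        (pvHits phrases done, pvRem phrases done)
      = (pvHits phrases (done ++ todo), pvRem phrases (done ++ todo)) := by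
  intro todo
  induction todo with
  | nil => intro done; simp
  | cons nb todo' ih =>
    intro done
    rw [List.foldl_cons]
    have hb : ∀ p ∈ pvRem phrases done, 0 ≤ p ∧ p < ((pvHits phrases done).length : Int) := by
      intro p hp
      have h1 := (List.mem_filter.mp hp).1
      have h2 := PySem.List.mem_pyRange_one.mp h1
      simp only [pvHits, List.length_map]
      omega
    obtain ⟨h2, h3⟩ := pvInner
      (fun p => PySem.Str.isIn (PySem.Str.upper nb) (PySem.List.pyGetD (phrases.map PySem.Str.upper) p ""))
      (some nb) (pvRem phrases done) (pvHits phrases done) ([] : List Int) hb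
    have hstate :
        (pvRem phrases done).foldl
          (fun (st2 : List (Option String) × List Int) p =>
            if PySem.Str.isIn (PySem.Str.upper nb) (PySem.List.pyGetD (phrases.map PySem.Str.upper) p "") then
              (PySem.List.pySetD st2.1 p (some nb), st2.2)
            else (st2.1, st2.2 ++ [p]))
          (pvHits phrases done, ([] : List Int))
        = (pvHits phrases (done ++ [nb]), pvRem phrases (done ++ [nb])) := by
      refine Prod.ext ?_ ?_
      · -- hit component, extensionally
        apply List.ext_getElem?
        intro q
        rw [h3 q]
        have hlen : (pvHits phrases (done ++ [nb])).length = phrases.length := by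
          simp [pvHits]
        by_cases hq : q < phrases.length
        · have hph : PySem.List.pyGetD phrases (q : Int) "" = phrases[q] := by
            rw [PySem.List.pyGetD_natCast, List.getD_eq_getElem?_getD, List.getElem?_eq_getElem hq]
            rfl
          have hrhs : (pvHits phrases (done ++ [nb]))[q]? = some (pvAFind phrases[q] (done ++ [nb])) := by
            simp [pvHits, hq]
          have hlhsD : (pvHits phrases done)[q]? = some (pvAFind phrases[q] done) := by
            simp [pvHits, hq]
          rw [hrhs, pvAFind_append, pvGetUps, hph]
          by_cases hnone : pvAFind phrases[q] done = none
          · rw [hnone]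
            by_cases hmm : PySem.Str.isIn (PySem.Str.upper nb) (PySem.Str.upper phrases[q]) = true
            · rw [if_pos ⟨(pvMem_rem phrases done q).mpr ⟨hq, by rwa [hph]⟩, hmm⟩, hmm]
              simp
            · have hmm' : PySem.Chars.isIn (PySem.Chars.upper nb.toList) (PySem.Chars.upper phrases[q].toList) = false := by
                simpa using hmm
              rw [if_neg, hlhsD, hnone]
              · simp [hmm']
              · rintro ⟨_, hc⟩
                exact hmm hc
          · obtain ⟨x, hx⟩ := Option.ne_none_iff_exists'.mp hnone
            rw [hx, if_neg, hlhsD, hx]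
            rintro ⟨hc, _⟩
            rw [pvMem_rem phrases done q, hph] at hc
            exact hnone hc.2
        · have h1 : (pvHits phrases done)[q]? = none := by
            simp [pvHits]; omega
          have h2' : (pvHits phrases (done ++ [nb]))[q]? = none := by
            simp [pvHits]; omega
          rw [h2', if_neg, h1]
          rintro ⟨hc, _⟩
          rw [pvMem_rem phrases done q] at hc
          omega
      · -- worklist component
        rw [h2, List.nil_append]
        unfold pvRem
        rw [List.filter_filter]
        apply List.filter_congr
        intro p _
        rw [pvAFind_append, pvGetUps]
        cases hA : pvAFind (PySem.List.pyGetD phrases p "") done with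
        | some x => simp
        | none => simp
    rw [hstate, ih (done ++ [nb]), List.append_assoc]
    rfl

-- the reconstruction pass over the finished hit table is A's per-phrase loop
theorem pvFinal (phrases nbs : List String) :
    (PySem.List.pyRange 0 (phrases.length : Int) 1).foldl
      (fun (acc : List String × List String) p =>
        match PySem.List.pyGetD (pvHits phrases nbs) p none with
        | some nb => (acc.1 ++ [PySem.List.pyGetD phrases p ""], acc.2 ++ [nb])
        | none => acc)
      ([], [])
    = phrases.foldl (fun acc phrase =>
        match pvAFind phrase nbs with
        | some nb => (acc.1 ++ [phrase], acc.2 ++ [nb])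
        | none => acc) ([], []) := by
  rw [PySem.List.foldl_congr_mem _ _
    (fun (acc : List String × List String) p =>
      match pvAFind (PySem.List.pyGetD phrases p "") nbs with
      | some nb => (acc.1 ++ [PySem.List.pyGetD phrases p ""], acc.2 ++ [nb])
      | none => acc) _ ?_]
  · exact PySem.List.foldl_pyRange_pyGetD' phrases ""
      (fun (acc : List String × List String) s =>
        match pvAFind s nbs with
        | some nb => (acc.1 ++ [s], acc.2 ++ [nb])
        | none => acc) ([], []) (le_refl 0)
  · intro acc p hp
    have h1 := PySem.List.mem_pyRange_one.mp hp
    have hq : PySem.List.pyGetD (pvHits phrases nbs) p none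
        = pvAFind (PySem.List.pyGetD phrases p "") nbs := by
      rw [PySem.List.pyGetD_eq_getElem _ _ h1.1 (by simpa [pvHits] using h1.2)]
      simp only [pvHits, List.getElem_map]
      congr 1
      rw [PySem.List.pyGetD_eq_getElem _ _ h1.1 (by exact_mod_cast h1.2)]
    rw [hq]

-- ===== VERDICT (by name: the statement is the Claim_ definition above) =====
theorem filter_phrases_by_neighbors_spec : Claim_equal_filter_phrases_by_neighbors := by
  intro phrases nbs _
  unfold Spec_filter_phrases_by_neighbors filter_phrases_by_neighbors filter_phrases_by_neighbors_alt
  have h0 : (List.replicate phrases.length (none : Option String),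
      PySem.List.pyRange 0 (phrases.length : Int) 1) = (pvHits phrases [], pvRem phrases []) := by
    refine Prod.ext ?_ ?_
    · simp [pvHits, pvAFind, List.map_const']
    · simp [pvRem, pvAFind]
  simp only [h0]
  rw [pvOuter phrases nbs []]
  simp only [List.nil_append]
  exact (pvFinal phrases nbs).symm
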